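-- pv_equiv track=rewrite | github.com/Madhukar0006/automation-ai | lc_bridge.py | _infer_vendor_product_from_text
-- ===== SOURCE A (Python) =====
-- from typing import Dict, Any
--
-- def _infer_vendor_product_from_text(text: str) -> Dict[str, str]:
--     """Lightweight heuristic mapping for vendor/product from raw text."""
--     t = text.lower()
--     vendor = None
--     product = None
--     if "cisco" in t:
--         vendor = "Cisco"
--         if any(k in t for k in ["asa", "%asa-"]):
--             product = "ASA"
--         elif any(k in t for k in ["dnac", "catalyst center", "dna center", "cisco dnac"]):
--             product = "Catalyst Center"
--         elif "ios" in t: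
--             product = "IOS"
--     elif "fortinet" in t or "fortigate" in t:
--         vendor = "Fortinet"
--         product = "FortiGate"
--     elif "palo alto" in t or "pan-os" in t or "panos" in t:
--         vendor = "Palo Alto Networks"
--         product = "PAN-OS"
--     elif "azure" in t:
--         vendor = "Microsoft"
--         product = "Azure"
--     return {"vendor": vendor, "product": product}
-- ===== SOURCE B (Python) =====
-- # Different strategy: instead of a short-circuiting if/elif chain, collect ALL
-- # matching keyword ranks exhaustively, then resolve vendor/product by minimum
-- # rank (priority).  First-match order of A is preserved because ranks follow
-- # A's branch order.
-- _VENDOR_KW = [("cisco", 0), ("fortinet", 1), ("fortigate", 1),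
--               ("palo alto", 2), ("pan-os", 2), ("panos", 2), ("azure", 3)]
-- _VENDORS = [("Cisco", None), ("Fortinet", "FortiGate"),
--             ("Palo Alto Networks", "PAN-OS"), ("Microsoft", "Azure")]
-- _CISCO_KW = [("asa", 0), ("%asa-", 0), ("dnac", 1), ("catalyst center", 1),
--              ("dna center", 1), ("cisco dnac", 1), ("ios", 2)]
-- _CISCO_PRODUCTS = ["ASA", "Catalyst Center", "IOS"]
--
-- def _infer_vendor_product_from_text(text):
--     t = text.lower()
--     ranks = [r for kw, r in _VENDOR_KW if kw in t]
--     if not ranks: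
--         return {"vendor": None, "product": None}
--     vendor, product = _VENDORS[min(ranks)]
--     if vendor == "Cisco":
--         sub = [r for kw, r in _CISCO_KW if kw in t]
--         if sub:
--             product = _CISCO_PRODUCTS[min(sub)]
--     return {"vendor": vendor, "product": product}
-- ===== Notes on version B (the rewrite author's own statement) =====
-- stated objective: alternative
-- what changed: Replaced the short-circuiting if/elif chain by exhaustive keyword matching: collect the ranks of all matching vendor keywords in one pass, resolve the vendor by minimum rank, then resolve the Cisco product the same way from a second rank table.
import Mathlib
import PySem

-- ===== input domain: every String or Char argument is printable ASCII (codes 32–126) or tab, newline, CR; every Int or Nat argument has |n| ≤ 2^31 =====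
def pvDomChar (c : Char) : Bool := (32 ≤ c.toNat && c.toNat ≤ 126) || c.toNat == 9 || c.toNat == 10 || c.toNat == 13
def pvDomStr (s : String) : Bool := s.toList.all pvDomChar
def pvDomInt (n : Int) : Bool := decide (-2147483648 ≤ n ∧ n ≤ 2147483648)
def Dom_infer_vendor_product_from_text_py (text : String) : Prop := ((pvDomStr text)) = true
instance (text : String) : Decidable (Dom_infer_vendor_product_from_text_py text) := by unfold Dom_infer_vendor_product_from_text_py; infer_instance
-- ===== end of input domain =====

-- B replaces the short-circuiting if/elif chain by exhaustive keyword matching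
-- with min-rank resolution (objective: alternative); same return value.

-- ===== PORT A =====
-- literal transliteration of A's if/elif chain
def infer_vendor_product_from_text_py (text : String) : List (String × Option String) :=
  let t := PySem.Str.lower text
  let vendor : Option String := none
  let product : Option String := none
  let vp : Option String × Option String :=
    if PySem.Str.isIn "cisco" t then
      let vendor := some "Cisco"
      let product :=
        if ["asa", "%asa-"].any (fun k => PySem.Str.isIn k t) then some "ASA"
        else if ["dnac", "catalyst center", "dna center", "cisco dnac"].any (fun k => PySem.Str.isIn k t) then
          some "Catalyst Center"
        else if PySem.Str.isIn "ios" t then some "IOS"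
        else product
      (vendor, product)
    else if PySem.Str.isIn "fortinet" t || PySem.Str.isIn "fortigate" t then
      (some "Fortinet", some "FortiGate")
    else if PySem.Str.isIn "palo alto" t || PySem.Str.isIn "pan-os" t || PySem.Str.isIn "panos" t then
      (some "Palo Alto Networks", some "PAN-OS")
    else if PySem.Str.isIn "azure" t then
      (some "Microsoft", some "Azure")
    else (vendor, product)
  [("vendor", vp.1), ("product", vp.2)]

-- ===== PORT B =====
-- rank tables (Source B's module constants)
def pvVendorKW : List (String × Nat) :=
  [("cisco", 0), ("fortinet", 1), ("fortigate", 1),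
   ("palo alto", 2), ("pan-os", 2), ("panos", 2), ("azure", 3)]
def pvVendors : List (String × Option String) :=
  [("Cisco", none), ("Fortinet", some "FortiGate"),
   ("Palo Alto Networks", some "PAN-OS"), ("Microsoft", some "Azure")]
def pvCiscoKW : List (String × Nat) :=
  [("asa", 0), ("%asa-", 0), ("dnac", 1), ("catalyst center", 1),
   ("dna center", 1), ("cisco dnac", 1), ("ios", 2)]
def pvCiscoProducts : List String := ["ASA", "Catalyst Center", "IOS"]

-- Python's min over a nonempty list r :: rs
def pvMin (r : Nat) : List Nat → Nat
  | [] => r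
  | x :: xs => pvMin (if x < r then x else r) xs

def infer_vendor_product_from_text_py_alt (text : String) : List (String × Option String) :=
  let t := PySem.Str.lower text
  let ranks := pvVendorKW.filterMap (fun kr => if PySem.Str.isIn kr.1 t then some kr.2 else none)
  match ranks with
  | [] => [("vendor", none), ("product", none)]
  | r :: rs =>
    -- index is always < 4, so pyGet? is some; getD gives the value
    let vp := (PySem.List.pyGet? pvVendors ((pvMin r rs : Nat) : Int)).getD ("", none)
    let product :=
      if vp.1 = "Cisco" then
        let sub := pvCiscoKW.filterMap (fun kr => if PySem.Str.isIn kr.1 t then some kr.2 else none)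
        match sub with
        | [] => vp.2
        | s :: ss => PySem.List.pyGet? pvCiscoProducts ((pvMin s ss : Nat) : Int)
      else vp.2
    [("vendor", some vp.1), ("product", product)]

-- ===== PRECONDITION & SPEC =====
def Spec_infer_vendor_product_from_text_py (text : String) (out : List (String × Option String)) : Prop := out = infer_vendor_product_from_text_py_alt text
instance (text : String) (out : List (String × Option String)) : Decidable (Spec_infer_vendor_product_from_text_py text out) := by unfold Spec_infer_vendor_product_from_text_py; infer_instance

-- ===== CLAIM (what is proved, stated in full; the proofs are below) =====
def Claim_equal_infer_vendor_product_from_text_py : Prop := ∀ (text : String), Dom_infer_vendor_product_from_text_py text → Spec_infer_vendor_product_from_text_py text (infer_vendor_product_from_text_py text)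

-- ===== LEMMAS AND PROOFS =====
-- Both programs depend on the input only through the 14 keyword-containment
-- booleans; over those the equality is a finite check.
theorem pv_key (c asa pasa dnac cc dc cd ios f fg pa po pos az : Bool) :
    (let vp : Option String × Option String :=
      if c then
        let product :=
          if [asa, pasa].any id then some "ASA"
          else if [dnac, cc, dc, cd].any id then some "Catalyst Center"
          else if ios then some "IOS"
          else none
        (some "Cisco", product)
      else if f || fg then (some "Fortinet", some "FortiGate")
      else if pa || po || pos then (some "Palo Alto Networks", some "PAN-OS")
      else if az then (some "Microsoft", some "Azure")
      else (none, none)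
     [("vendor", vp.1), ("product", vp.2)]) =
    (let ranks := ([("cisco", (0:Nat)), ("fortinet", 1), ("fortigate", 1),
        ("palo alto", 2), ("pan-os", 2), ("panos", 2), ("azure", 3)].zip
        [c, f, fg, pa, po, pos, az]).filterMap
          (fun kr => if kr.2 then some kr.1.2 else none)
     match ranks with
     | [] => [("vendor", none), ("product", none)]
     | r :: rs =>
       let vp := (PySem.List.pyGet? pvVendors ((pvMin r rs : Nat) : Int)).getD ("", none)
       let product :=
         if vp.1 = "Cisco" then
           let sub := ([("asa", (0:Nat)), ("%asa-", 0), ("dnac", 1), ("catalyst center", 1),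
              ("dna center", 1), ("cisco dnac", 1), ("ios", 2)].zip
              [asa, pasa, dnac, cc, dc, cd, ios]).filterMap
                (fun kr => if kr.2 then some kr.1.2 else none)
           match sub with
           | [] => vp.2
           | s :: ss => PySem.List.pyGet? pvCiscoProducts ((pvMin s ss : Nat) : Int)
         else vp.2
       [("vendor", some vp.1), ("product", product)]) := by
  revert c asa pasa dnac cc dc cd ios f fg pa po pos az
  decide

-- ===== VERDICT (by name: the statement is the Claim_ definition above) =====
theorem infer_vendor_product_from_text_py_spec : Claim_equal_infer_vendor_product_from_text_py := by
  intro text _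
  unfold Spec_infer_vendor_product_from_text_py infer_vendor_product_from_text_py
    infer_vendor_product_from_text_py_alt
  have h := pv_key (PySem.Str.isIn "cisco" (PySem.Str.lower text))
    (PySem.Str.isIn "asa" (PySem.Str.lower text))
    (PySem.Str.isIn "%asa-" (PySem.Str.lower text))
    (PySem.Str.isIn "dnac" (PySem.Str.lower text))
    (PySem.Str.isIn "catalyst center" (PySem.Str.lower text))
    (PySem.Str.isIn "dna center" (PySem.Str.lower text))
    (PySem.Str.isIn "cisco dnac" (PySem.Str.lower text))
    (PySem.Str.isIn "ios" (PySem.Str.lower text))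
    (PySem.Str.isIn "fortinet" (PySem.Str.lower text))
    (PySem.Str.isIn "fortigate" (PySem.Str.lower text))
    (PySem.Str.isIn "palo alto" (PySem.Str.lower text))
    (PySem.Str.isIn "pan-os" (PySem.Str.lower text))
    (PySem.Str.isIn "panos" (PySem.Str.lower text))
    (PySem.Str.isIn "azure" (PySem.Str.lower text))
  simpa [pvVendorKW, pvCiscoKW, List.zip, List.any] using h
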